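-- pv_equiv track=rewrite | github.com/lululeta2014/mihaib | forge/old/prjeuler/p11.py | get_diags2
-- ===== SOURCE A (Python) =====
-- def get_row_size(elem_count, rows):
--     if elem_count % rows:
--         raise ValueError('list size {0} not multiple of row count {1}'
--                 .format(elem_count, rows))
--     return elem_count // rows
--
-- def get_diags2(num_list, rows):
--     cols = get_row_size(len(num_list), rows)
--     #flip lines horizontally
--     num_list = [num_list[r * cols + (cols - c - 1)]
--             for r in range(rows) for c in range(cols)]
--     # diagonals starting on first row
--     diag_r1 = [[num_list[r * cols + (c + r)]
--                 for r in range(min(rows, cols - c))]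
--             for c in range(cols)]
--     # diagonals starting on first column, without first
--     diag_c1 = [[num_list[(r + c) * cols + c]
--                 for c in range(min(rows - r, cols))]
--             for r in range(1, rows)]
--     return diag_r1 + diag_c1
-- ===== SOURCE B (Python) =====
-- def get_row_size(elem_count, rows):
--     if elem_count % rows:
--         raise ValueError('list size {0} not multiple of row count {1}'
--                 .format(elem_count, rows))
--     return elem_count // rows
--
--
-- def get_diags2(num_list, rows):
--     # Read each anti-diagonal (constant r + c) of the original grid directly,
--     # without materializing a horizontally flipped copy.
--     cols = get_row_size(len(num_list), rows)
--
--     def diag(s):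
--         return [num_list[r * cols + (s - r)]
--                 for r in range(max(0, s - cols + 1), min(rows, s + 1))]
--
--     return [diag(s) for s in range(cols - 1, -1, -1)] + \
--            [diag(s) for s in range(cols, cols + rows - 1)]
-- ===== Notes on version B (the rewrite author's own statement) =====
-- stated objective: simpler
-- what changed: B drops A's intermediate horizontally-flipped copy and its two separately-indexed comprehension families: it reads each anti-diagonal (constant r+c) of the original grid directly with one shared diag(s) helper, emitting the keys in A's order.
import Mathlib
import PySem

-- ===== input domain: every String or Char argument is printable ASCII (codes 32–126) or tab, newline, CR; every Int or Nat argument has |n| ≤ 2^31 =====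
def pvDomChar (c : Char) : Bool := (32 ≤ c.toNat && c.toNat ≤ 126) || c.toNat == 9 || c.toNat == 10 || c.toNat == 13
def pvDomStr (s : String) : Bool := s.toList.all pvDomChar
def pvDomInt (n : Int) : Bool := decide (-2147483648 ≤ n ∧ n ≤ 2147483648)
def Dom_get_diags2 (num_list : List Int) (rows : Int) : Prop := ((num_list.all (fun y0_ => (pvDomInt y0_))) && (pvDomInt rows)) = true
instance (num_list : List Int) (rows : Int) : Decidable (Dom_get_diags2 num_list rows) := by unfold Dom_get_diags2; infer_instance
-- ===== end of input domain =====

-- B reads each anti-diagonal of the original grid directly (key s = r + c) instead of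
-- A's flipped intermediate copy with two separately-indexed comprehension families; objective: simpler.

-- ===== PORT A =====
-- get_row_size after its guard; the ValueError / ZeroDivisionError cases are excluded by Pre_get_diags2
def pvRowSize (elem_count : Int) (rows : Int) : Int := PySem.Int.floordiv elem_count rows

-- the horizontally flipped copy A builds first
def pvFlip (num_list : List Int) (rows cols : Int) : List Int :=
  (PySem.List.pyRange 0 rows 1).flatMap (fun r =>
    (PySem.List.pyRange 0 cols 1).map (fun c =>
      PySem.List.pyGetD num_list (r * cols + (cols - c - 1)) 0))

def get_diags2 (num_list : List Int) (rows : Int) : List (List Int) :=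
  let cols := pvRowSize (num_list.length : Int) rows
  let nl := pvFlip num_list rows cols
  let diag_r1 := (PySem.List.pyRange 0 cols 1).map (fun c =>
      (PySem.List.pyRange 0 (min rows (cols - c)) 1).map (fun r =>
        PySem.List.pyGetD nl (r * cols + (c + r)) 0))
  let diag_c1 := (PySem.List.pyRange 1 rows 1).map (fun r =>
      (PySem.List.pyRange 0 (min (rows - r) cols) 1).map (fun c =>
        PySem.List.pyGetD nl ((r + c) * cols + c) 0))
  diag_r1 ++ diag_c1

-- ===== PORT B =====
def get_diags2_alt (num_list : List Int) (rows : Int) : List (List Int) :=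
  let cols := pvRowSize (num_list.length : Int) rows
  let diag := fun (s : Int) =>
    (PySem.List.pyRange (max 0 (s - cols + 1)) (min rows (s + 1)) 1).map (fun r =>
      PySem.List.pyGetD num_list (r * cols + (s - r)) 0)
  (PySem.List.pyRange (cols - 1) (-1) (-1)).map diag ++
  (PySem.List.pyRange cols (cols + rows - 1) 1).map diag

-- ===== PRECONDITION & SPEC =====
-- Pre_ excludes exactly the inputs where A raises: rows = 0 (ZeroDivisionError) and
-- len(num_list) % rows ≠ 0 (ValueError).  B raises the same exceptions there.
def Pre_get_diags2 (num_list : List Int) (rows : Int) : Prop :=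
  rows ≠ 0 ∧ PySem.Int.mod (num_list.length : Int) rows = 0
instance (num_list : List Int) (rows : Int) : Decidable (Pre_get_diags2 num_list rows) := by
  unfold Pre_get_diags2; infer_instance

def pvWitness_get_diags2 : List Int × Int := ([1, 2, 3, 4, 5, 6], 2)

def Spec_get_diags2 (num_list : List Int) (rows : Int) (out : List (List Int)) : Prop := out = get_diags2_alt num_list rows
instance (num_list : List Int) (rows : Int) (out : List (List Int)) : Decidable (Spec_get_diags2 num_list rows out) := by unfold Spec_get_diags2; infer_instance

-- ===== CLAIM (what is proved, stated in full; the proofs are below) =====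
def Claim_equal_get_diags2 : Prop := ∀ (num_list : List Int) (rows : Int), Dom_get_diags2 num_list rows → Pre_get_diags2 num_list rows → Spec_get_diags2 num_list rows (get_diags2 num_list rows)

-- ===== LEMMAS AND PROOFS =====

theorem pv_flatMap_length {α : Type} (f : Nat → Nat → α) (R C : Nat) :
    ((List.range R).flatMap (fun a => (List.range C).map (f a))).length = R * C := by
  induction R with
  | zero => simp
  | succ R ih =>
    rw [List.range_succ, List.flatMap_append]
    simp [ih, Nat.succ_mul]

theorem pv_flatMap_getElem? {α : Type} (f : Nat → Nat → α) (R C r j : Nat)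
    (hr : r < R) (hj : j < C) :
    ((List.range R).flatMap (fun a => (List.range C).map (f a)))[r * C + j]? = some (f r j) := by
  induction R with
  | zero => omega
  | succ R ih =>
    rw [List.range_succ, List.flatMap_append]
    rcases Nat.lt_or_ge r R with h | h
    · rw [List.getElem?_append_left]
      · exact ih h
      · rw [pv_flatMap_length]
        calc r * C + j < r * C + C := by omega
        _ ≤ R * C := by nlinarith
    · have hrR : r = R := by omega
      subst hrR
      rw [show r * C + j = ((List.range r).flatMap (fun a => (List.range C).map (f a))).length + j by rw [pv_flatMap_length],
        List.getElem?_append_right (by omega)]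
      simp [hj]

theorem pv_flip_get (num_list : List Int) (rows cols : Int) (hc : 0 ≤ cols)
    (r j : Int) (h0r : 0 ≤ r) (hrr : r < rows) (h0j : 0 ≤ j) (hjc : j < cols) :
    PySem.List.pyGetD (pvFlip num_list rows cols) (r * cols + j) 0
      = PySem.List.pyGetD num_list (r * cols + (cols - 1 - j)) 0 := by
  obtain ⟨R, rfl⟩ := Int.eq_ofNat_of_zero_le (show (0:Int) ≤ rows by omega)
  obtain ⟨C, rfl⟩ := Int.eq_ofNat_of_zero_le hc
  obtain ⟨rn, rfl⟩ := Int.eq_ofNat_of_zero_le h0r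
  obtain ⟨jn, rfl⟩ := Int.eq_ofNat_of_zero_le h0j
  unfold pvFlip
  rw [PySem.List.pyRange_one 0 (R:Int), PySem.List.pyRange_one 0 (C:Int)]
  simp only [sub_zero, Int.toNat_natCast, List.flatMap_map, List.map_map]
  rw [show ((rn:Int) * (C:Int) + (jn:Int)) = ((rn * C + jn : Nat) : Int) by push_cast; ring,
    PySem.List.pyGetD_natCast, List.getD_eq_getElem?_getD,
    pv_flatMap_getElem? _ R C rn jn (by exact_mod_cast hrr) (by exact_mod_cast hjc)]
  simp only [Option.getD_some]
  exact congrArg (fun i => PySem.List.pyGetD num_list i 0) (by push_cast; ring)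

theorem pv_main (num_list : List Int) (rows cols : Int) (hr : 0 < rows) (hc : 0 ≤ cols) :
    ((PySem.List.pyRange 0 cols 1).map (fun c =>
      (PySem.List.pyRange 0 (min rows (cols - c)) 1).map (fun r =>
        PySem.List.pyGetD (pvFlip num_list rows cols) (r * cols + (c + r)) 0)) ++
     (PySem.List.pyRange 1 rows 1).map (fun r =>
      (PySem.List.pyRange 0 (min (rows - r) cols) 1).map (fun c =>
        PySem.List.pyGetD (pvFlip num_list rows cols) ((r + c) * cols + c) 0)))
    = ((PySem.List.pyRange (cols - 1) (-1) (-1)).map (fun s =>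
        (PySem.List.pyRange (max 0 (s - cols + 1)) (min rows (s + 1)) 1).map (fun r =>
          PySem.List.pyGetD num_list (r * cols + (s - r)) 0)) ++
       (PySem.List.pyRange cols (cols + rows - 1) 1).map (fun s =>
        (PySem.List.pyRange (max 0 (s - cols + 1)) (min rows (s + 1)) 1).map (fun r =>
          PySem.List.pyGetD num_list (r * cols + (s - r)) 0))) := by
  refine congrArg₂ (· ++ ·) ?_ ?_
  · rw [PySem.List.pyRange_one 0 cols, PySem.List.pyRange_neg_one (cols - 1) (-1)]
    rw [show cols - 1 - (-1) = cols - 0 by ring]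
    rw [List.map_map, List.map_map]
    apply List.map_congr_left
    intro k hk
    rw [List.mem_range] at hk
    simp only [Function.comp]
    have e1 : max 0 ((cols - 1 - (k:Int)) - cols + 1) = 0 := by omega
    have e2 : min rows ((cols - 1 - (k:Int)) + 1) = min rows (cols - (0 + (k:Int))) := by omega
    rw [e1, e2]
    apply List.map_congr_left
    intro r hr'
    rw [PySem.List.mem_pyRange_one] at hr'
    have hkc : (k:Int) < cols := by omega
    rw [pv_flip_get num_list rows cols hc r ((0 + (k:Int)) + r) hr'.1 (by omega) (by omega) (by omega)]
    congr 1
    omega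
  · rw [PySem.List.pyRange_one 1 rows, PySem.List.pyRange_one cols (cols + rows - 1)]
    rw [show cols + rows - 1 - cols = rows - 1 by ring]
    rw [List.map_map, List.map_map]
    apply List.map_congr_left
    intro k hk
    rw [List.mem_range] at hk
    simp only [Function.comp]
    have hmax : max 0 ((cols + (k:Int)) - cols + 1) = 1 + (k:Int) := by omega
    have hmin : min rows ((cols + (k:Int)) + 1) = min rows (cols + (1 + (k:Int))) := by omega
    rw [hmax, hmin]
    rw [PySem.List.pyRange_one 0 (min (rows - (1 + (k:Int))) cols),
        PySem.List.pyRange_one (1 + (k:Int)) (min rows (cols + (1 + (k:Int))))]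
    rw [show (min rows (cols + (1 + (k:Int))) - (1 + (k:Int))).toNat
          = (min (rows - (1 + (k:Int))) cols - 0).toNat by omega]
    rw [List.map_map, List.map_map]
    apply List.map_congr_left
    intro t ht
    rw [List.mem_range] at ht
    simp only [Function.comp]
    rw [pv_flip_get num_list rows cols hc (1 + (k:Int) + (0 + (t:Int))) (0 + (t:Int))
          (by omega) (by omega) (by omega) (by omega)]
    exact congrArg (fun i => PySem.List.pyGetD num_list i 0) (by ring)


-- ===== VERDICT (by name: the statement is the Claim_ definition above) =====
theorem get_diags2_spec : Claim_equal_get_diags2 := by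
  intro num_list rows _hdom hpre
  obtain ⟨hrne, hmod⟩ := hpre
  unfold Spec_get_diags2 get_diags2 get_diags2_alt
  dsimp only
  set n : Int := (num_list.length : Int) with hn
  set cols : Int := pvRowSize n rows with hcols
  have hn0 : 0 ≤ n := by positivity
  have hprod : cols * rows = n := by
    have := PySem.Int.floordiv_mul_add_mod n rows
    rw [hmod] at this
    simpa [hcols, pvRowSize] using this
  rcases lt_or_gt_of_ne hrne with hneg | hpos
  · have hc0 : cols ≤ 0 := by nlinarith
    rw [PySem.List.pyRange_one_eq_nil (a := 0) (b := cols) hc0,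
        PySem.List.pyRange_one_eq_nil (a := 1) (b := rows) (by omega),
        PySem.List.pyRange_neg_one_eq_nil (by omega),
        PySem.List.pyRange_one_eq_nil (a := cols) (b := cols + rows - 1) (by omega)]
    simp
  · have hc0 : 0 ≤ cols := by nlinarith
    exact pv_main num_list rows cols hpos hc0
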